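-- pv_equiv track=rewrite | github.com/s1anden/adventofcode2017 | day4/passphrase.py | isValidPassphrase
-- ===== SOURCE A (Python) =====
-- def isValidPassphrase(phrase):
--     words = phrase.split()
--     uniqueWords = set()
--     for word in words:
--         if word in uniqueWords:
--             return False
--         uniqueWords.add(word)
--     return True
-- ===== SOURCE B (Python) =====
-- def isValidPassphrase(phrase):
--     words = sorted(phrase.split())
--     for prev, cur in zip(words, words[1:]):
--         if prev == cur:
--             return False
--     return True
-- ===== Notes on version B (the rewrite author's own statement) =====
-- stated objective: alternative
-- what changed: Replaces set-based membership tracking with sort-then-scan: sort the words and return False iff some adjacent pair is equal.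
import Mathlib
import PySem

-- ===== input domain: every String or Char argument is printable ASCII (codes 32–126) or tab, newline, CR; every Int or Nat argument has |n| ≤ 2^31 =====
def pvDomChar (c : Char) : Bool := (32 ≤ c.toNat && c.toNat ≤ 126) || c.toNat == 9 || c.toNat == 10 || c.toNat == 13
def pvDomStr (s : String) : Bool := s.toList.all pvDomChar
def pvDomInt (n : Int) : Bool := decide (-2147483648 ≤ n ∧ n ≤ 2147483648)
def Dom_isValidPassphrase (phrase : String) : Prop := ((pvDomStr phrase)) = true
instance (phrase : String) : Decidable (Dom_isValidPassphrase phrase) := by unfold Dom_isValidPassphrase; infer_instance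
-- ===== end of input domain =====

-- B changes the algorithm: sort the words and compare adjacent neighbours instead of tracking a set (objective: alternative).

-- ===== PORT A =====
-- the 'for word in words' loop with early return, carrying the set uniqueWords
def pvALoop (words : List String) (uniqueWords : PySem.Set String) : Bool :=
  match words with
  | [] => true
  | word :: rest =>
      if PySem.Set.contains uniqueWords word then false
      else pvALoop rest (PySem.Set.add uniqueWords word)

def isValidPassphrase (phrase : String) : Bool :=
  pvALoop (PySem.Str.split₀ phrase) PySem.Set.empty

-- ===== PORT B =====
-- 'for prev, cur in zip(words, words[1:])' with early return: scan adjacent pairs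
def pvBScan (words : List String) : Bool :=
  match words with
  | [] => true
  | [_] => true
  | prev :: cur :: rest => if prev == cur then false else pvBScan (cur :: rest)

def isValidPassphrase_alt (phrase : String) : Bool :=
  pvBScan (PySem.List.sorted (PySem.Str.split₀ phrase) (fun w => w) false)

-- ===== PRECONDITION & SPEC =====
def Spec_isValidPassphrase (phrase : String) (out : Bool) : Prop := out = isValidPassphrase_alt phrase
instance (phrase : String) (out : Bool) : Decidable (Spec_isValidPassphrase phrase out) := by unfold Spec_isValidPassphrase; infer_instance

-- ===== CLAIM (what is proved, stated in full; the proofs are below) =====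
def Claim_equal_isValidPassphrase : Prop := ∀ (phrase : String), Dom_isValidPassphrase phrase → Spec_isValidPassphrase phrase (isValidPassphrase phrase)

-- ===== LEMMAS AND PROOFS =====

theorem pvALoop_iff (words : List String) (s : PySem.Set String) :
    pvALoop words s = true ↔ words.Nodup ∧ ∀ w ∈ words, w ∉ s := by
  induction words generalizing s with
  | nil => simp [pvALoop]
  | cons w rest ih =>
      simp only [pvALoop]
      by_cases h : w ∈ s
      · rw [if_pos ((PySem.Set.contains_iff s w).mpr h)]
        simp only [Bool.false_eq_true, false_iff, not_and]
        rintro _ hall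
        exact (hall w (by simp)) h
      · rw [if_neg (by simp [h]), ih]
        simp only [List.nodup_cons, List.mem_cons]
        constructor
        · rintro ⟨hnd, hall⟩
          refine ⟨⟨fun hw => (hall w hw (by simp [PySem.Set.mem_add])).elim, hnd⟩, ?_⟩
          intro x hx
          rcases hx with rfl | hx
          · exact h
          · intro hxs
            exact hall x hx (by simp [PySem.Set.mem_add, hxs])
        · rintro ⟨⟨hwr, hnd⟩, hall⟩
          refine ⟨hnd, ?_⟩
          intro x hx hxs
          rw [PySem.Set.mem_add] at hxs
          rcases hxs with hxs | rfl
          · exact hall x (Or.inr hx) hxs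
          · exact hwr hx

theorem pvBScan_iff_chain (words : List String) :
    pvBScan words = true ↔ words.IsChain (fun a b => a ≠ b) := by
  induction words with
  | nil => simp [pvBScan]
  | cons x rest ih =>
      cases rest with
      | nil => simp [pvBScan]
      | cons y t =>
          rw [List.isChain_cons_cons, ← ih]
          by_cases h : x = y
          · simp [pvBScan, h]
          · simp [pvBScan, beq_eq_false_iff_ne.mpr h, h]

-- adjacent-distinct plus adjacent-≤ gives adjacent-<
theorem isChain_lt_of_ne_le (l : List String)
    (hne : l.IsChain (fun a b => a ≠ b)) (hle : l.IsChain (fun a b => a ≤ b)) :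
    l.IsChain (fun a b => a < b) := by
  induction l with
  | nil => simp
  | cons x rest ih =>
      cases rest with
      | nil => simp
      | cons y t =>
          rw [List.isChain_cons_cons] at *
          exact ⟨lt_of_le_of_ne hle.1 hne.1, ih hne.2 hle.2⟩

theorem pvBScan_iff_nodup (words : List String)
    (hp : words.Pairwise (fun a b => a ≤ b)) :
    pvBScan words = true ↔ words.Nodup := by
  rw [pvBScan_iff_chain]
  constructor
  · intro hc
    have hlt : words.IsChain (fun a b : String => a < b) :=
      isChain_lt_of_ne_le words hc (List.isChain_iff_pairwise.mpr hp)
    exact (List.IsChain.pairwise hlt).imp (fun h => ne_of_lt h)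
  · intro hnd
    exact List.Pairwise.isChain hnd

-- ===== VERDICT (by name: the statement is the Claim_ definition above) =====
theorem isValidPassphrase_spec : Claim_equal_isValidPassphrase := by
  intro phrase _
  unfold Spec_isValidPassphrase isValidPassphrase isValidPassphrase_alt
  rw [Bool.eq_iff_iff]
  rw [pvALoop_iff, pvBScan_iff_nodup _ (by simpa using PySem.List.sorted_pairwise (PySem.Str.split₀ phrase) (fun w => w))]
  rw [(PySem.List.sorted_perm (PySem.Str.split₀ phrase) (fun w => w) false).nodup_iff]
  simp [PySem.Set.empty]
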